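-- pv_equiv track=rewrite | github.com/pedrodemaia/Google-Foobar | Level 4/1- running.py | solution
-- ===== SOURCE A (Python) =====
-- def solution(times, times_limit):
--     # Your code here
--     import itertools
--
--     def getTimeToComplete(times,bunnies):
--         route = [0] + bunnies + [len(times)-1]
--         time = 0
--         for i in range(1,len(route)):
--             time += times[route[i-1]][route[i]]
--         return time
--
--     n = len(times)
--     num_bunnies = n - 2
--
--     # get minimum time to reach each position from each origin
--     # if it is possible to leave i and reach j passing in k faster than the
--     # direct route, the time from i to j is adjusted
--     for i in range(n):
--         for j in range(n):
--             for k in range(n):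
--                 times[i][j] = min(times[i][j], times[i][k] + times[k][j])
--
--     # check if can get infinity time by leaving some place and returning to it
--     for i in range(n):
--         if times[i][i] < 0:
--             return list(range(num_bunnies))
--
--     # create all possible permutations for all quantities of bunnies
--     for num in range(num_bunnies, 0, -1):
--         for permutation in itertools.permutations(range(1,num_bunnies+1), num):
--             bunnies = list(permutation)
--             if getTimeToComplete(times,bunnies) <= times_limit:
--                 return sorted([bunny-1 for bunny in bunnies])
--     return []
-- ===== SOURCE B (Python) =====
-- def solution(times, times_limit):
--     n = len(times)
--     d = [row[:] for row in times]
--     for i in range(n):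
--         for j in range(n):
--             for k in range(n):
--                 c = d[i][k] + d[k][j]
--                 if c < d[i][j]:
--                     d[i][j] = c
--     if any(d[i][i] < 0 for i in range(n)):
--         return list(range(n - 2))
--     target = n - 1
--
--     def best_completion(avail, k, last):
--         # minimal time from `last` through k distinct bunnies of `avail` and on to `target`
--         if k == 0:
--             return d[last][target]
--         best = None
--         for i in range(len(avail)):
--             x = avail[i]
--             sub = best_completion(avail[:i] + avail[i + 1:], k - 1, x)
--             if sub is None:
--                 continue
--             c = d[last][x] + sub
--             if best is None or c < best:
--                 best = c
--         return best
--
--     def first_feasible(avail, k, last, t):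
--         # lexicographically first length-k sequence over `avail` whose best completion fits the limit
--         if k == 0:
--             return [] if t + d[last][target] <= times_limit else None
--         for i in range(len(avail)):
--             x = avail[i]
--             rest = avail[:i] + avail[i + 1:]
--             sub = best_completion(rest, k - 1, x)
--             if sub is not None and t + d[last][x] + sub <= times_limit:
--                 r = first_feasible(rest, k - 1, x, t + d[last][x])
--                 if r is not None:
--                     return [x] + r
--         return None
--
--     pool = list(range(1, n - 1))
--     for num in range(n - 2, 0, -1):
--         r = first_feasible(pool, num, 0, 0)
--         if r is not None:
--             return sorted(x - 1 for x in r)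
--     return []
-- ===== Notes on version B (the rewrite author's own statement) =====
-- stated objective: alternative
-- what changed: A tests every complete permutation produced by itertools; B finds the answer by an ordered DFS that extends a prefix only when an exact best-completion oracle (minimal remaining path cost over the unused bunnies) says a feasible completion exists, and B's relaxation pass writes a cell only when the value improves instead of unconditionally storing a min.
import Mathlib
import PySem

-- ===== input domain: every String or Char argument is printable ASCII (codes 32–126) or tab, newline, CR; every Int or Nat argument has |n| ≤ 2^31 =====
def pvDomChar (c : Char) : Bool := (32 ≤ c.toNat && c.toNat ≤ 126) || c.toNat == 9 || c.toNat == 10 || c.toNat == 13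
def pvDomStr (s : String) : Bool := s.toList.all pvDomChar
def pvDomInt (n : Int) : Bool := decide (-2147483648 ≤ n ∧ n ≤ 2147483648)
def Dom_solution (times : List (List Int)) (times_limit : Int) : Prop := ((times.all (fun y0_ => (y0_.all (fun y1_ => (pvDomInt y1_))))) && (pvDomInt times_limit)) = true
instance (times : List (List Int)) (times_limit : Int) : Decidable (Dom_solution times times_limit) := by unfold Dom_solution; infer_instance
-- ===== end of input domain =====

-- B replaces A's scan over all itertools permutations by an ordered DFS guided by an exact
-- best-completion (minimal remaining path cost) oracle; equivalence is about the RETURN value only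
-- (Python A relaxes `times` in place, Python B works on a copy).

-- ===== PORT A =====
-- times[i][j] read/write; out-of-range indexing raises in Python and is excluded by Pre_
def mgetA (m : List (List Int)) (i j : Int) : Int :=
  PySem.List.pyGetD (PySem.List.pyGetD m i []) j 0

def msetA (m : List (List Int)) (i j : Int) (v : Int) : List (List Int) :=
  m.modify i.toNat (fun row => row.set j.toNat v)

-- the in-place i,j,k triple loop of A (note: NOT the standard k-outer Floyd–Warshall order)
def relaxA (m0 : List (List Int)) : List (List Int) :=
  let n : Int := (m0.length : Int)
  (PySem.List.pyRange 0 n 1).foldl (fun m i =>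
    (PySem.List.pyRange 0 n 1).foldl (fun m j =>
      (PySem.List.pyRange 0 n 1).foldl (fun m k =>
        msetA m i j (min (mgetA m i j) (mgetA m i k + mgetA m k j))) m) m) m0

def timeToCompleteA (m : List (List Int)) (bunnies : List Int) : Int :=
  let route : List Int := 0 :: (bunnies ++ [(m.length : Int) - 1])
  (PySem.List.pyRange 1 ((route.length : Nat) : Int) 1).foldl
    (fun t i => t + mgetA m (PySem.List.pyGetD route (i - 1) 0) (PySem.List.pyGetD route i 0)) 0

-- inner `for permutation in itertools.permutations(...)` with early return
def scanPermsA (m : List (List Int)) (limit : Int) : List (List Int) → Option (List Int)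
  | [] => none
  | p :: rest =>
    if timeToCompleteA m p ≤ limit then
      some (PySem.List.sorted (p.map (fun b => b - 1)) (fun x => x) false)
    else scanPermsA m limit rest

-- outer `for num in range(num_bunnies, 0, -1)` with early return, else []
def numLoopA (m : List (List Int)) (limit : Int) (pool : List Int) : List Int → List Int
  | [] => []
  | num :: rest =>
    match scanPermsA m limit (PySem.List.permutations pool num.toNat) with
    | some ans => ans
    | none => numLoopA m limit pool rest

def solution (times : List (List Int)) (times_limit : Int) : List Int :=
  let n : Int := (times.length : Int)
  let num_bunnies : Int := n - 2
  let m := relaxA times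
  if (PySem.List.pyRange 0 n 1).any (fun i => decide (mgetA m i i < 0)) then
    PySem.List.pyRange 0 num_bunnies 1
  else
    numLoopA m times_limit (PySem.List.pyRange 1 (num_bunnies + 1) 1)
      (PySem.List.pyRange num_bunnies 0 (-1))

-- ===== PORT B =====
-- B only ever indexes with the non-negative ints its own loops produce, so plain getD is exact there
def getB (m : List (List Int)) (i j : Nat) : Int := (m.getD i []).getD j 0

def bget (m : List (List Int)) (i j : Int) : Int := (m.getD i.toNat []).getD j.toNat 0

-- same relaxation pass as A, on a copy, written as a conditional update
def relaxB (m0 : List (List Int)) : List (List Int) :=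
  let n := m0.length
  (List.range n).foldl (fun m i =>
    (List.range n).foldl (fun m j =>
      (List.range n).foldl (fun m k =>
        let c := getB m i k + getB m k j
        if c < getB m i j then m.modify i (fun row => row.set j c) else m) m) m) m0

-- minimal time from `last` through k distinct bunnies of `avail` and on to `target` (none: no such sequence)
def hminB (d : List (List Int)) (target : Int) (avail : List Int) (k : Nat) (last : Int) : Option Int :=
  match k with
  | 0 => some (bget d last target)
  | Nat.succ k' =>
    (List.range avail.length).foldl (fun best i =>
      match avail[i]? with
      | none => best
      | some x =>
        match hminB d target (avail.eraseIdx i) k' x with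
        | none => best
        | some sub =>
          let c := bget d last x + sub
          match best with
          | none => some c
          | some b => if c < b then some c else some b) none

-- lexicographically first length-k sequence over `avail` whose best completion fits the limit
def dfsB (d : List (List Int)) (target limit : Int) (avail : List Int) (k : Nat) (last t : Int) :
    Option (List Int) :=
  match k with
  | 0 => if t + bget d last target ≤ limit then some [] else none
  | Nat.succ k' =>
    (List.range avail.length).foldl (fun acc i =>
      match acc with
      | some r => some r
      | none =>
        match avail[i]? with
        | none => none
        | some x =>
          match hminB d target (avail.eraseIdx i) k' x with
          | none => none
          | some sub =>
            if t + bget d last x + sub ≤ limit then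
              (dfsB d target limit (avail.eraseIdx i) k' x (t + bget d last x)).map (fun r => x :: r)
            else none) none

def searchB (d : List (List Int)) (target limit : Int) (pool : List Int) : List Int → List Int
  | [] => []
  | num :: rest =>
    match dfsB d target limit pool num.toNat 0 0 with
    | some r => PySem.List.sorted (r.map (fun x => x - 1)) (fun x => x) false
    | none => searchB d target limit pool rest

def solution_alt (times : List (List Int)) (times_limit : Int) : List Int :=
  let n := times.length
  let d := relaxB times
  if (List.range n).any (fun i => decide (getB d i i < 0)) then
    (List.range (n - 2)).map (fun k => (k : Int))
  else
    searchB d ((n : Int) - 1) times_limit (PySem.List.pyRange 1 ((n : Int) - 1) 1)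
      (PySem.List.pyRange ((n : Int) - 2) 0 (-1))

-- ===== PRECONDITION & SPEC =====
-- Pre_ excludes inputs having a row with fewer entries than there are rows, exactly where
-- Python A raises IndexError on times[i][j] during the relaxation pass
def Pre_solution (times : List (List Int)) (times_limit : Int) : Prop :=
  ∀ row ∈ times, times.length ≤ row.length
instance (times : List (List Int)) (times_limit : Int) : Decidable (Pre_solution times times_limit) := by
  unfold Pre_solution; infer_instance

def pvWitness_solution : List (List Int) × Int :=
  ([[0, 1, 1, 1], [1, 0, 1, 1], [1, 1, 0, 1], [1, 1, 1, 0]], 3)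

def Spec_solution (times : List (List Int)) (times_limit : Int) (out : List Int) : Prop := out = solution_alt times times_limit
instance (times : List (List Int)) (times_limit : Int) (out : List Int) : Decidable (Spec_solution times times_limit out) := by unfold Spec_solution; infer_instance

-- ===== CLAIM (what is proved, stated in full; the proofs are below) =====
def Claim_equal_solution : Prop := ∀ (times : List (List Int)) (times_limit : Int), Dom_solution times times_limit → Pre_solution times times_limit → Spec_solution times times_limit (solution times times_limit)

-- ===== LEMMAS AND PROOFS =====

-- generic pair-chain sum along a route, parameterised by the edge reader
def pairSum (g : Int → Int → Int) : Int → List Int → Int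
  | _, [] => 0
  | a, b :: l => g a b + pairSum g b l

-- proof-side reading of B's accumulated cost
def costB (d : List (List Int)) (target : Int) : Int → List Int → Int
  | last, [] => bget d last target
  | last, x :: q => bget d last x + costB d target x q

theorem costB_eq_pairSum (d : List (List Int)) (target last : Int) (p : List Int) :
    costB d target last p = pairSum (fun a b => bget d a b) last (p ++ [target]) := by
  induction p generalizing last with
  | nil => simp [costB, pairSum]
  | cons x q ih => simp [costB, pairSum, ih]

theorem modify_set_getD_self (m : List (List Int)) (i j : Nat) :
    m.modify i (fun row => row.set j ((m.getD i []).getD j 0)) = m := by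
  rcases Nat.lt_or_ge i m.length with hi | hi
  · have hrow : m.getD i [] = m[i] := List.getD_eq_getElem m [] hi
    rw [List.modify_eq_set_get _ hi]
    have hget : m.get ⟨i, hi⟩ = m[i] := rfl
    rcases Nat.lt_or_ge j (m[i].length) with hj | hj
    · rw [hrow, hget, List.getD_eq_getElem _ _ hj, List.set_getElem_self hj, List.set_getElem_self hi]
    · rw [hrow, hget, List.set_eq_of_length_le hj, List.set_getElem_self hi]
  · exact List.modify_eq_self hi

theorem mgetA_natCast (m : List (List Int)) (i j : Nat) : mgetA m (↑i) (↑j) = getB m i j := by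
  simp [mgetA, getB, PySem.List.pyGetD_natCast]

theorem step_eq (m : List (List Int)) (i j : Nat) (c : Int) :
    msetA m (↑i) (↑j) (min (mgetA m (↑i) (↑j)) c) =
      if c < getB m i j then m.modify i (fun row => row.set j c) else m := by
  rw [mgetA_natCast]
  unfold msetA
  simp only [Int.toNat_natCast]
  by_cases h : c < getB m i j
  · rw [min_eq_right (le_of_lt h)]; simp [h]
  · rw [min_eq_left (le_of_not_gt h)]
    simp only [h, if_false]
    exact modify_set_getD_self m i j

theorem relax_eq (m0 : List (List Int)) : relaxA m0 = relaxB m0 := by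
  simp only [relaxA, relaxB]
  rw [PySem.List.pyRange_zero_nat m0.length]
  simp only [List.foldl_map]
  congr 1
  funext m i
  congr 1
  funext m j
  congr 1
  funext m k
  simpa using step_eq m i j (mgetA m (↑i) (↑k) + mgetA m (↑k) (↑j)) |>.trans (by simp [mgetA_natCast])

theorem foldl_length_inv {α : Type} (l : List α) (f : List (List Int) → α → List (List Int)) (m : List (List Int)) (h : ∀ m x, (f m x).length = m.length) : (l.foldl f m).length = m.length := by
  induction l generalizing m with
  | nil => rfl
  | cons x xs ih => simp [List.foldl, h, ih]

theorem length_relaxB (m0 : List (List Int)) : (relaxB m0).length = m0.length := by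
  simp only [relaxB]
  apply foldl_length_inv; intro m i
  apply foldl_length_inv; intro m j
  apply foldl_length_inv; intro m k
  dsimp only; split <;> simp

theorem pairFold (m : List (List Int)) (l : List Int) (a t : Int) :
    (PySem.List.pyRange 1 (((a :: l).length : Nat) : Int) 1).foldl
      (fun t i => t + mgetA m (PySem.List.pyGetD (a :: l) (i - 1) 0) (PySem.List.pyGetD (a :: l) i 0)) t
      = t + pairSum (fun x y => mgetA m x y) a l := by
  induction l generalizing a t with
  | nil =>
    rw [PySem.List.pyRange_one_eq_nil (by simp)]
    simp [pairSum]
  | cons b l' ih =>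
    have hlt : (1 : Int) < ((a :: b :: l').length : Nat) := by
      simp only [List.length_cons]; push_cast; omega
    rw [PySem.List.pyRange_one_cons hlt]
    simp only [List.foldl_cons]
    have h0 : PySem.List.pyGetD (a :: b :: l') ((1:Int) - 1) 0 = a := by
      norm_num [PySem.List.pyGetD_zero_cons]
    have h1 : PySem.List.pyGetD (a :: b :: l') (1:Int) 0 = b := by
      have e : (1:Int) = ((1:Nat):Int) := by norm_num
      rw [e, PySem.List.pyGetD_natCast]; rfl
    rw [h0, h1]
    have hr2 : PySem.List.pyRange (1+1) (((a :: b :: l').length : Nat) : Int) 1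
        = (List.range l'.length).map (fun k : Nat => (1:Int)+1 + ↑k) := by
      rw [PySem.List.pyRange_one]
      have e : ((((a :: b :: l').length : Nat) : Int) - (1+1)).toNat = l'.length := by
        simp; omega
      rw [e]
    have hr1 : PySem.List.pyRange 1 (((b :: l').length : Nat) : Int) 1
        = (List.range l'.length).map (fun k : Nat => (1:Int) + ↑k) := by
      rw [PySem.List.pyRange_one]
      have e : ((((b :: l').length : Nat) : Int) - 1).toNat = l'.length := by
        simp
      rw [e]
    have key :
        (List.range l'.length).foldl
          (fun t (i : Nat) => t + mgetA m (PySem.List.pyGetD (a :: b :: l') ((1:Int)+1+↑i - 1) 0) (PySem.List.pyGetD (a :: b :: l') ((1:Int)+1+↑i) 0)) (t + mgetA m a b)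
        = (List.range l'.length).foldl
          (fun t (i : Nat) => t + mgetA m (PySem.List.pyGetD (b :: l') ((1:Int)+↑i - 1) 0) (PySem.List.pyGetD (b :: l') ((1:Int)+↑i) 0)) (t + mgetA m a b) := by
      apply PySem.List.foldl_congr_mem
      intro acc k _
      have e1 : (1:Int)+1+(k:Int) - 1 = ((k+1 : Nat) : Int) := by push_cast; ring
      have e2 : (1:Int)+1+(k:Int) = ((k+2 : Nat) : Int) := by push_cast; ring
      have e3 : (1:Int)+(k:Int) - 1 = ((k : Nat) : Int) := by ring
      have e4 : (1:Int)+(k:Int) = ((k+1 : Nat) : Int) := by push_cast; ring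
      rw [e1, e2, e3, e4, PySem.List.pyGetD_natCast, PySem.List.pyGetD_natCast,
        PySem.List.pyGetD_natCast, PySem.List.pyGetD_natCast]
      simp
    have hfin := ih b (t + mgetA m a b)
    rw [hr1, List.foldl_map] at hfin
    rw [hr2, List.foldl_map]
    rw [key, hfin]
    simp [pairSum]; ring

theorem timeToCompleteA_eq (m : List (List Int)) (p : List Int) :
    timeToCompleteA m p = pairSum (fun x y => mgetA m x y) 0 (p ++ [(m.length : Int) - 1]) := by
  have h := pairFold m (p ++ [(m.length : Int) - 1]) 0 0
  simpa [timeToCompleteA] using h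

theorem mgetA_eq_bget (m : List (List Int)) (x y : Int) (hx : 0 ≤ x) (hy : 0 ≤ y) :
    mgetA m x y = bget m x y := by
  rw [mgetA, bget, PySem.List.pyGetD_of_nonneg _ _ hx, PySem.List.pyGetD_of_nonneg _ _ hy]

theorem pairSum_congr_nonneg (m : List (List Int)) (a : Int) (l : List Int)
    (ha : 0 ≤ a) (hl : ∀ x ∈ l, 0 ≤ x) :
    pairSum (fun x y => mgetA m x y) a l = pairSum (fun x y => bget m x y) a l := by
  induction l generalizing a with
  | nil => rfl
  | cons b l' ih =>
    have hb : 0 ≤ b := hl b (by simp)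
    rw [pairSum, pairSum, mgetA_eq_bget m a b ha hb, ih b hb (fun x hx => hl x (by simp [hx]))]

theorem mem_of_mem_permutations {xs p : List Int} {r : Nat} {a : Int}
    (hp : p ∈ PySem.List.permutations xs r) (ha : a ∈ p) : a ∈ xs := by
  induction r generalizing xs p with
  | zero => simp [PySem.List.permutations] at hp; subst hp; simp at ha
  | succ r' ih =>
    simp only [PySem.List.permutations] at hp
    rw [List.mem_flatMap] at hp
    obtain ⟨i, hi, hpi⟩ := hp
    cases hxi : xs[i]? with
    | none => rw [hxi] at hpi; simp at hpi
    | some x =>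
      rw [hxi] at hpi
      rw [List.mem_map] at hpi
      obtain ⟨q, hq, rfl⟩ := hpi
      rcases List.mem_cons.mp ha with rfl | haq
      · exact List.mem_of_getElem? hxi
      · exact List.mem_of_mem_eraseIdx (ih hq haq)

theorem find?_congr_mem {α : Type} (l : List α) (p q : α → Bool) (h : ∀ x ∈ l, p x = q x) :
    l.find? p = l.find? q := by
  induction l with
  | nil => rfl
  | cons x xs ih =>
    rw [List.find?_cons, List.find?_cons, h x (by simp)]
    cases q x <;> simp [ih fun y hy => h y (by simp [hy])]
theorem hmin_spec (d : List (List Int)) (target : Int) :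
    ∀ (k : Nat) (avail : List Int) (last L : Int),
      (∃ c, hminB d target avail k last = some c ∧ c ≤ L) ↔
        (∃ p ∈ PySem.List.permutations avail k, costB d target last p ≤ L) := by
  intro k
  induction k with
  | zero =>
    intro avail last L
    simp [hminB, costB, PySem.List.permutations]
  | succ k' ih =>
    intro avail last L
    have inner : ∀ (idxs : List Nat) (best : Option Int),
        (∃ c, (idxs.foldl (fun best i =>
          match avail[i]? with
          | none => best
          | some x =>
            match hminB d target (avail.eraseIdx i) k' x with
            | none => best
            | some sub =>
              let c := bget d last x + sub
              match best with
              | none => some c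
              | some b => if c < b then some c else some b) best) = some c ∧ c ≤ L) ↔
        ((∃ c, best = some c ∧ c ≤ L) ∨
          ∃ i ∈ idxs, ∃ x, avail[i]? = some x ∧
            ∃ c, hminB d target (avail.eraseIdx i) k' x = some c ∧ bget d last x + c ≤ L) := by
      intro idxs
      induction idxs with
      | nil => simp
      | cons i idxs iih =>
        intro best
        rw [List.foldl_cons, iih]
        have step_iff :
            (∃ c, (match avail[i]? with
              | none => best
              | some x =>
                match hminB d target (avail.eraseIdx i) k' x with
                | none => best
                | some sub =>
                  let c := bget d last x + sub
                  match best with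
                  | none => some c
                  | some b => if c < b then some c else some b) = some c ∧ c ≤ L) ↔
            ((∃ c, best = some c ∧ c ≤ L) ∨
              ∃ x, avail[i]? = some x ∧
                ∃ c, hminB d target (avail.eraseIdx i) k' x = some c ∧ bget d last x + c ≤ L) := by
          cases hxi : avail[i]? with
          | none => simp
          | some x =>
            simp only [Option.some.injEq, exists_eq_left']
            cases hsub : hminB d target (avail.eraseIdx i) k' x with
            | none => simp
            | some sub =>
              simp only [Option.some.injEq, exists_eq_left']
              cases best with
              | none => simp
              | some b =>
                rw [show (match some b with
                    | none => some (bget d last x + sub)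
                    | some b => if bget d last x + sub < b then some (bget d last x + sub) else some b)
                  = if bget d last x + sub < b then some (bget d last x + sub) else some b from rfl]
                split_ifs with hlt <;> simp <;> omega
        rw [step_iff]
        simp only [List.mem_cons]
        constructor
        · rintro (h | h)
          · rcases h with h | h
            · exact Or.inl h
            · exact Or.inr ⟨i, Or.inl rfl, h⟩
          · obtain ⟨i', hi', h⟩ := h
            exact Or.inr ⟨i', Or.inr hi', h⟩
        · rintro (h | ⟨i', hi' | hi', h⟩)
          · exact Or.inl (Or.inl h)
          · exact Or.inl (Or.inr (hi' ▸ h))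
          · exact Or.inr ⟨i', hi', h⟩
    rw [hminB]
    rw [inner (List.range avail.length) none]
    rw [show (∃ c, (none : Option Int) = some c ∧ c ≤ L) ↔ False from by simp, false_or]
    rw [PySem.List.permutations]
    constructor
    · rintro ⟨i, hi, x, hxi, c, hc, hcL⟩
      obtain ⟨q, hq, hqL⟩ := (ih (avail.eraseIdx i) x (L - bget d last x)).mp ⟨c, hc, by omega⟩
      refine ⟨x :: q, List.mem_flatMap.mpr ⟨i, hi, ?_⟩, by simp only [costB]; omega⟩
      simp only [hxi, List.mem_map]
      exact ⟨q, hq, rfl⟩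
    · rintro ⟨p, hp, hpL⟩
      obtain ⟨i, hi, hpi⟩ := List.mem_flatMap.mp hp
      cases hxi : avail[i]? with
      | none => simp only [hxi] at hpi; exact absurd hpi (List.not_mem_nil)
      | some x =>
        simp only [hxi, List.mem_map] at hpi
        obtain ⟨q, hq, rfl⟩ := hpi
        have hc' : costB d target x q ≤ L - bget d last x := by
          simp only [costB] at hpL; omega
        obtain ⟨c, hc, hcL⟩ := (ih (avail.eraseIdx i) x (L - bget d last x)).mpr ⟨q, hq, hc'⟩
        exact ⟨i, hi, x, hxi, c, hc, by omega⟩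


theorem dfs_spec (d : List (List Int)) (target limit : Int) :
    ∀ (k : Nat) (avail : List Int) (last t : Int),
      dfsB d target limit avail k last t =
        (PySem.List.permutations avail k).find? (fun p => decide (t + costB d target last p ≤ limit)) := by
  intro k
  induction k with
  | zero =>
    intro avail last t
    by_cases h : t + bget d last target ≤ limit <;>
      simp [dfsB, PySem.List.permutations, costB, h]
  | succ k' ih =>
    intro avail last t
    have skip : ∀ (idxs : List Nat) (r : List Int),
        idxs.foldl (fun acc i =>
          match acc with
          | some r => some r
          | none =>
            match avail[i]? with
            | none => none
            | some x =>
              match hminB d target (avail.eraseIdx i) k' x with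
              | none => none
              | some sub =>
                if t + bget d last x + sub ≤ limit then
                  (dfsB d target limit (avail.eraseIdx i) k' x (t + bget d last x)).map (fun r => x :: r)
                else none) (some r) = some r := by
      intro idxs
      induction idxs with
      | nil => intro r; rfl
      | cons i idxs iih => intro r; exact iih r
    have inner : ∀ (idxs : List Nat),
        idxs.foldl (fun acc i =>
          match acc with
          | some r => some r
          | none =>
            match avail[i]? with
            | none => none
            | some x =>
              match hminB d target (avail.eraseIdx i) k' x with
              | none => none
              | some sub =>
                if t + bget d last x + sub ≤ limit then
                  (dfsB d target limit (avail.eraseIdx i) k' x (t + bget d last x)).map (fun r => x :: r)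
                else none) none
        = (idxs.flatMap (fun i =>
            match avail[i]? with
            | none => ([] : List (List Int))
            | some x => (PySem.List.permutations (avail.eraseIdx i) k').map (fun p => x :: p))).find?
              (fun p => decide (t + costB d target last p ≤ limit)) := by
      intro idxs
      induction idxs with
      | nil => simp
      | cons i idxs iih =>
        rw [List.foldl_cons, List.flatMap_cons, List.find?_append]
        have hbi :
            (match (none : Option (List Int)) with
              | some r => some r
              | none =>
                match avail[i]? with
                | none => none
                | some x =>
                  match hminB d target (avail.eraseIdx i) k' x with
                  | none => none
                  | some sub =>
                    if t + bget d last x + sub ≤ limit then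
                      (dfsB d target limit (avail.eraseIdx i) k' x (t + bget d last x)).map (fun r => x :: r)
                    else none)
            = (match avail[i]? with
                | none => ([] : List (List Int))
                | some x => (PySem.List.permutations (avail.eraseIdx i) k').map (fun p => x :: p)).find?
                  (fun p => decide (t + costB d target last p ≤ limit)) := by
          cases hxi : avail[i]? with
          | none => simp
          | some x =>
            cases hsub : hminB d target (avail.eraseIdx i) k' x with
            | none =>
              dsimp only
              rw [hsub]
              symm
              rw [List.find?_eq_none]
              rintro p hp hpred
              obtain ⟨q, hq, rfl⟩ := List.mem_map.mp hp
              have hcost : costB d target x q ≤ limit - t - bget d last x := by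
                simp only [costB, decide_eq_true_eq] at hpred ⊢; omega
              obtain ⟨c, hc, -⟩ :=
                (hmin_spec d target k' (avail.eraseIdx i) x (limit - t - bget d last x)).mpr
                  ⟨q, hq, hcost⟩
              rw [hsub] at hc; simp at hc
            | some sub =>
              dsimp only
              rw [hsub]
              dsimp only
              by_cases hg : t + bget d last x + sub ≤ limit
              · have hfun : ((fun p => decide (t + costB d target last p ≤ limit)) ∘ (fun p : List Int => x :: p))
                    = (fun q => decide (t + bget d last x + costB d target x q ≤ limit)) := by
                  funext q
                  simp only [Function.comp_apply, costB, decide_eq_decide]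
                  omega
                rw [if_pos hg, ih (avail.eraseIdx i) x (t + bget d last x), List.find?_map, hfun]
              · rw [if_neg hg]
                symm
                rw [List.find?_eq_none]
                rintro p hp hpred
                obtain ⟨q, hq, rfl⟩ := List.mem_map.mp hp
                have hcost : costB d target x q ≤ limit - t - bget d last x := by
                  simp only [costB, decide_eq_true_eq] at hpred ⊢; omega
                obtain ⟨c, hc, hcL⟩ :=
                  (hmin_spec d target k' (avail.eraseIdx i) x (limit - t - bget d last x)).mpr
                    ⟨q, hq, hcost⟩
                rw [hsub] at hc
                cases hc
                omega
        rw [hbi]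
        cases hfi : (match avail[i]? with
            | none => ([] : List (List Int))
            | some x => (PySem.List.permutations (avail.eraseIdx i) k').map (fun p => x :: p)).find?
              (fun p => decide (t + costB d target last p ≤ limit)) with
        | some r => rw [skip idxs r]; rfl
        | none => rw [iih]; rfl
    calc dfsB d target limit avail (Nat.succ k') last t
        = _ := inner (List.range avail.length)
      _ = (PySem.List.permutations avail (Nat.succ k')).find?
            (fun p => decide (t + costB d target last p ≤ limit)) := by
        rw [PySem.List.permutations]
        congr 1
        congr 1
        funext i
        cases hxi : avail[i]? <;> simp

theorem scanPermsA_eq (m : List (List Int)) (limit : Int) (ps : List (List Int)) :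
    scanPermsA m limit ps =
      ((ps.find? (fun p => decide (timeToCompleteA m p ≤ limit))).map
        (fun p => PySem.List.sorted (p.map (fun b => b - 1)) (fun x => x) false)) := by
  induction ps with
  | nil => simp [scanPermsA]
  | cons p rest ih =>
    by_cases h : timeToCompleteA m p ≤ limit <;> simp [scanPermsA, h, ih]

theorem cost_bridge (m : List (List Int)) (n : Nat) (hm : m.length = n) (hn : 3 ≤ n)
    (p : List Int) (hp : ∀ x ∈ p, 1 ≤ x) :
    timeToCompleteA m p = 0 + costB m ((n : Int) - 1) 0 p := by
  rw [timeToCompleteA_eq, costB_eq_pairSum, hm]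
  rw [pairSum_congr_nonneg m 0 (p ++ [(n : Int) - 1]) le_rfl]
  · ring_nf
  · intro x hx
    rcases List.mem_append.mp hx with hx | hx
    · exact le_trans (by norm_num) (hp x hx)
    · rw [List.mem_singleton.mp hx]; omega

theorem numLoop_eq_search (m : List (List Int)) (limit : Int) (n : Nat) (hm : m.length = n)
    (nums : List Int) (hnums : ∀ u ∈ nums, 1 ≤ u ∧ u ≤ (n : Int) - 2) :
    numLoopA m limit (PySem.List.pyRange 1 (((n : Int) - 2) + 1) 1) nums =
      searchB m ((n : Int) - 1) limit (PySem.List.pyRange 1 ((n : Int) - 1) 1) nums := by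
  have hpool : ((n : Int) - 2) + 1 = (n : Int) - 1 := by ring
  rw [hpool]
  induction nums with
  | nil => rfl
  | cons num rest ih =>
    have hnum := hnums num (by simp)
    have hn : 3 ≤ n := by omega
    rw [numLoopA, searchB]
    rw [scanPermsA_eq, dfs_spec]
    rw [find?_congr_mem _ _ (fun p => decide (0 + costB m ((n : Int) - 1) 0 p ≤ limit))
      (fun p hp => by
        rw [cost_bridge m n hm hn p (fun x hx => by
          have := mem_of_mem_permutations hp hx
          exact (PySem.List.mem_pyRange_one.mp this).1)])]
    cases hfind : (PySem.List.permutations (PySem.List.pyRange 1 ((n : Int) - 1) 1) num.toNat).find?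
        (fun p => decide (0 + costB m ((n : Int) - 1) 0 p ≤ limit)) with
    | some p => simp
    | none => simpa using ih (fun u hu => hnums u (by simp [hu]))

-- ===== VERDICT (by name: the statement is the Claim_ definition above) =====
theorem solution_spec : Claim_equal_solution := by
  intro times times_limit _ _
  unfold Spec_solution
  simp only [solution, solution_alt]
  rw [relax_eq]
  set d := relaxB times with hd
  have hany : (PySem.List.pyRange 0 ((times.length : Nat) : Int) 1).any (fun i => decide (mgetA d i i < 0))
      = (List.range times.length).any (fun i => decide (getB d i i < 0)) := by
    rw [PySem.List.pyRange_zero_nat, List.any_map]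
    congr 1
    funext i
    simp [mgetA_natCast]
  rw [hany]
  by_cases hneg : (List.range times.length).any (fun i => decide (getB d i i < 0))
  · rw [if_pos hneg, if_pos hneg]
    rcases Nat.lt_or_ge times.length 2 with h2 | h2
    · rw [PySem.List.pyRange_one_eq_nil (by omega)]
      have : times.length - 2 = 0 := by omega
      simp [this]
    · rw [show ((times.length : Int) - 2) = ((times.length - 2 : Nat) : Int) from by omega,
        PySem.List.pyRange_zero_nat]
      simpa using (List.map_eq_flatMap (f := fun k : Nat => (k : Int)) (l := List.range (times.length - 2)))
  · rw [if_neg hneg, if_neg hneg]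
    exact numLoop_eq_search d times_limit times.length (length_relaxB times) _
      (fun u hu => by
        have := PySem.List.mem_pyRange_neg_one.mp hu
        omega)
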